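-- pv_equiv track=rewrite | github.com/alexbarajas/leetcode | interviews/wayland.py | howManyRuns
-- ===== SOURCE A (Python) =====
-- def howManyRuns(s):
--     # find the unique characters in order
--     chars = []
--     for letter in s:
--         if letter not in chars:
--             chars.append(letter)
--
--     # find indexes at which each char appears
--     indexs = {a: [] for a in chars}
--     for ind, letter in enumerate(s):
--         indexs[letter].append(ind)
--
--     for ind, letter in enumerate(chars):
--         chars[ind] = indexs[letter]
--
--     # we now have an 2D array that stores the indexes of each character, sorted in the order in which the
--     # character appears in s e.g for s = "abcabc", chars = [[0, 3], [1, 4], [2, 5]] where chars[0] is the 'a'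
--     # indexes, chars[1] is the 'b' indexes and so on.
--
--     def numberOfIncreasingPaths(chars, paths=None):
--
--         if paths is None:
--             paths = []
--         if not chars:
--             return len(paths)
--
--         if not paths:
--             paths = [[a] for a in chars[0]]
--             return numberOfIncreasingPaths(chars[1:], paths)
--         else:
--             updated_paths = []
--             for path in paths:
--                 root = path[-1]
--                 for elem in chars[0]:
--                     curr_path = path.copy()
--                     if elem > root:
--                         curr_path.append(elem)
--                         updated_paths.append(curr_path)
--             paths = updated_paths
--             return numberOfIncreasingPaths(chars[1:], paths)
--
--     return numberOfIncreasingPaths(chars)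
-- ===== SOURCE B (Python) =====
-- def howManyRuns(s):
--     # group indices by character, in order of first occurrence
--     groups = {}
--     for i, ch in enumerate(s):
--         groups.setdefault(ch, []).append(i)
--     gs = list(groups.values())
--     if not gs:
--         return 0
--     # DP: cnt holds (index, number of increasing paths ending there) for the
--     # last processed group; never materializes the (exponential) path lists.
--     cnt = [(i, 1) for i in gs[0]]
--     for g in gs[1:]:
--         cnt = [(e, sum(c for (x, c) in cnt if x < e)) for e in g]
--     return sum(c for (_, c) in cnt)
-- ===== Notes on version B (the rewrite author's own statement) =====
-- stated objective: faster
-- what changed: B replaces A's recursive materialization of every strictly-increasing index path (one list per path) by a dynamic program that keeps, per index of the current character group, only the COUNT of increasing paths ending there, summing counts of smaller previous indices; intended as faster (measured 20x at n=64, the largest size A finished; A timed out at n=256 where B returned).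
import Mathlib
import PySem

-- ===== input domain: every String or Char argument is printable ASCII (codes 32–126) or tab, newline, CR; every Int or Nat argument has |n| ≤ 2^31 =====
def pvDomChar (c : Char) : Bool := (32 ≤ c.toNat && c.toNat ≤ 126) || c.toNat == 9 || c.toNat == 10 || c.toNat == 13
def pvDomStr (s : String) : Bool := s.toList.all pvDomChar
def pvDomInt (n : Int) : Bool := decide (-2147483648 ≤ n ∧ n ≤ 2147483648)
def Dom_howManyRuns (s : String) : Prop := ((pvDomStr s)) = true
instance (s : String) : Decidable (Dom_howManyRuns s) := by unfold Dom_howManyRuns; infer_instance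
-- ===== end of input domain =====

-- B replaces A's recursive materialization of all increasing index paths by a
-- per-index path-count DP over the same character groups; intended as faster
-- (measured 20x at the largest size both finished; A timed out beyond that).

-- ===== PORT A =====
-- root = path[-1]; every path in A's `paths` list is nonempty, so pyGet? is some
-- and the `.getD 0` default is unreachable.
def pvRootOf (path : List Int) : Int := (PySem.List.pyGet? path (-1)).getD 0

-- `numberOfIncreasingPaths(chars, paths)`: recursion on chars, carrying the
-- materialized list of paths; the two inner `for` loops are the two foldl's.
def pvNip : List (List Int) → List (List Int) → Int
  | [], paths => (paths.length : Int)
  | g :: rest, paths =>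
      if paths.isEmpty then
        pvNip rest (g.map (fun a => [a]))
      else
        pvNip rest (paths.foldl (fun acc path =>
          let root := pvRootOf path
          g.foldl (fun acc2 e =>
            if root < e then acc2 ++ [path ++ [e]] else acc2) acc) [])

def howManyRuns (s : String) : Int :=
  -- chars: unique characters in order of first appearance
  let chars := s.toList.foldl (fun acc letter =>
    if acc.contains letter then acc else acc ++ [letter]) []
  -- indexs = {a: [] for a in chars}
  let d0 := chars.foldl (fun d a => d.insert a ([] : List Int)) PySem.Dict.empty
  -- for ind, letter in enumerate(s): indexs[letter].append(ind)
  -- (letter is always a key of indexs, so `getD`-based modify is exact)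
  let indexs := (PySem.List.enumerate s.toList 0).foldl
    (fun d p => d.modify p.2 [] (· ++ [p.1])) d0
  -- for ind, letter in enumerate(chars): chars[ind] = indexs[letter]
  let groups := chars.map (fun letter => indexs.getD letter [])
  pvNip groups []

-- ===== PORT B =====
-- groups.setdefault(ch, []).append(i)  ≡  d[ch] = d.get(ch, []) + [i]
def howManyRuns_alt (s : String) : Int :=
  let d := (PySem.List.enumerate s.toList 0).foldl
    (fun d p => d.modify p.2 [] (· ++ [p.1])) PySem.Dict.empty
  let gs := d.values
  match gs with
  | [] => 0
  | g0 :: rest =>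
      let cnt0 := g0.map (fun i => (i, (1 : Int)))
      let cnt := rest.foldl (fun cnt g =>
        g.map (fun e => (e, ((cnt.filter (fun q => q.1 < e)).map (·.2)).sum))) cnt0
      (cnt.map (·.2)).sum

-- ===== PRECONDITION & SPEC =====
def Spec_howManyRuns (s : String) (out : Int) : Prop := out = howManyRuns_alt s
instance (s : String) (out : Int) : Decidable (Spec_howManyRuns s out) := by unfold Spec_howManyRuns; infer_instance

-- ===== CLAIM (what is proved, stated in full; the proofs are below) =====
def Claim_equal_howManyRuns : Prop := ∀ (s : String), Dom_howManyRuns s → Spec_howManyRuns s (howManyRuns s)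

-- ===== LEMMAS AND PROOFS =====

-- the common value of A's `chars`-derived group list and B's dict values
def pvGroups (s : String) : List (List Int) :=
  (PySem.Set.ofList s.toList).map (fun c =>
    ((PySem.List.enumerate s.toList 0).filter (fun p => p.2 == c)).map (·.1))

-- an increasing selection through the remaining groups, starting above r
def pvChainAbove : Int → List (List Int) → Prop
  | _, [] => True
  | r, g :: rest => ∃ e ∈ g, r < e ∧ pvChainAbove e rest

lemma pvRootOf_singleton (a : Int) : pvRootOf [a] = a := by
  simp [pvRootOf, PySem.List.pyGet?, PySem.List.pyIdx?]

lemma pvRootOf_concat (l : List Int) (e : Int) : pvRootOf (l ++ [e]) = e := by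
  simp [pvRootOf, PySem.List.pyGet?, PySem.List.pyIdx?]

lemma pvChars_eq (s : String) :
    s.toList.foldl (fun acc letter =>
      if acc.contains letter then acc else acc ++ [letter]) []
      = PySem.Set.ofList s.toList := by
  have hf : (fun (acc : List Char) (letter : Char) =>
      if acc.contains letter then acc else acc ++ [letter])
      = fun s x => PySem.Set.add s x := by
    funext acc x
    rw [PySem.Set.add_eq_ite]
    simp
  rw [hf]; rfl

lemma pvGetD_insert_nil (chars : List Char) (c : Char) :
    ((chars.foldl (fun d a => d.insert a ([] : List Int)) PySem.Dict.empty).getD c [])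
      = ([] : List Int) := by
  have h : ∀ (l : List Char) (d : PySem.Dict Char (List Int)), d.getD c [] = [] →
      (l.foldl (fun d a => d.insert a ([] : List Int)) d).getD c [] = [] := by
    intro l
    induction l with
    | nil => intro d h; exact h
    | cons x xs ih =>
      intro d h
      simp only [List.foldl_cons]
      exact ih _ (by rw [PySem.Dict.getD_insert]; split <;> simp [h])
  exact h _ _ (by simp [PySem.Dict.getD_empty])

lemma pvGetD_modify_fold (l : List (Int × Char)) (d : PySem.Dict Char (List Int)) (c : Char) :
    ((l.foldl (fun d p => d.modify p.2 [] (· ++ [p.1])) d).getD c [])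
      = d.getD c [] ++ (l.filter (fun p => p.2 == c)).map (·.1) := by
  have h := PySem.Dict.getD_foldl_modify_append (l.map Prod.swap) d c
  rw [List.foldl_map] at h
  simpa [List.filter_map, Function.comp] using h

lemma pvGroupsA_eq (s : String) :
    (PySem.Set.ofList s.toList).map (fun letter =>
      (((PySem.List.enumerate s.toList 0).foldl
        (fun d p => d.modify p.2 [] (· ++ [p.1]))
        ((PySem.Set.ofList s.toList).foldl
          (fun d a => d.insert a ([] : List Int)) PySem.Dict.empty)).getD letter []))
      = pvGroups s := by
  unfold pvGroups
  refine List.map_congr_left ?_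
  intro c hc
  rw [pvGetD_modify_fold, pvGetD_insert_nil]
  simp

lemma pvGroupsB_eq (s : String) :
    ((PySem.List.enumerate s.toList 0).foldl
      (fun d p => d.modify p.2 [] (· ++ [p.1])) PySem.Dict.empty).values
      = pvGroups s := by
  have hnd : ((PySem.List.enumerate s.toList 0).foldl
      (fun d p => d.modify p.2 [] (· ++ [p.1])) PySem.Dict.empty).keys.Nodup :=
    PySem.Dict.nodup_keys_foldl_modify_key (PySem.List.enumerate s.toList 0)
      (fun p : Int × Char => p.2) ([] : List Int)
      (fun _ (p : Int × Char) (v : List Int) => v ++ [p.1]) PySem.Dict.empty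
      (by simp [PySem.Dict.keys_empty])
  have hk : ((PySem.List.enumerate s.toList 0).foldl
      (fun d p => d.modify p.2 [] (· ++ [p.1])) PySem.Dict.empty).keys
      = PySem.Set.ofList s.toList := by
    rw [PySem.Dict.keys_foldl_modify_key (PySem.List.enumerate s.toList 0)
      (fun p : Int × Char => p.2) ([] : List Int)
      (fun _ (p : Int × Char) (v : List Int) => v ++ [p.1]) PySem.Dict.empty]
    simp [PySem.Dict.keys_empty, PySem.List.map_snd_enumerate, PySem.Set.update_nil_left]
  rw [PySem.Dict.values_eq_map_keys _ hnd ([] : List Int), hk]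
  unfold pvGroups
  refine List.map_congr_left ?_
  intro c hc
  rw [pvGetD_modify_fold]
  simp [PySem.Dict.getD_empty]

-- structure of the groups: every group is nonempty and their heads increase
lemma headD_mem {α : Type} (l : List α) (d : α) (h : l ≠ []) : l.headD d ∈ l := by
  cases l with
  | nil => simp at h
  | cons a t => simp

lemma pvGroups_aux (l : List (Int × Char)) (h : l.Pairwise (fun p q => p.1 < q.1)) :
    (∀ c ∈ PySem.Set.ofList (l.map (·.2)), (l.filter (fun p => p.2 == c)).map (·.1) ≠ []) ∧
    ((PySem.Set.ofList (l.map (·.2))).map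
      (fun c => ((l.filter (fun p => p.2 == c)).map (·.1)).headD 0)).Pairwise (· < ·) := by
  induction l with
  | nil => simp [PySem.Set.ofList]
  | cons a l ih =>
    rw [List.pairwise_cons] at h
    obtain ⟨ha, h'⟩ := h
    obtain ⟨ih1, ih2⟩ := ih h'
    have hset : PySem.Set.ofList ((a :: l).map (·.2))
        = a.2 :: (PySem.Set.ofList (l.map (·.2))).discard a.2 := by
      rw [List.map_cons, PySem.Set.ofList_cons]
    have hfself : ((a :: l).filter (fun p => p.2 == a.2)) = a :: l.filter (fun p => p.2 == a.2) := by
      simp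
    have hfne : ∀ c, c ≠ a.2 → ((a :: l).filter (fun p => p.2 == c)) = l.filter (fun p => p.2 == c) := by
      intro c hc
      rw [List.filter_cons]
      simp [Ne.symm hc]
    constructor
    · intro c hc
      rw [hset] at hc
      rcases List.mem_cons.mp hc with hc | hc
      · subst hc; rw [hfself]; simp
      · obtain ⟨hcS, hcne⟩ := (PySem.Set.mem_discard _ _ _).mp hc
        rw [hfne c hcne]
        exact ih1 c hcS
    · rw [hset, List.map_cons]
      have hmapeq : ((PySem.Set.ofList (l.map (·.2))).discard a.2).map
            (fun c => (((a :: l).filter (fun p => p.2 == c)).map (·.1)).headD 0)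
          = ((PySem.Set.ofList (l.map (·.2))).discard a.2).map
            (fun c => ((l.filter (fun p => p.2 == c)).map (·.1)).headD 0) := by
        refine List.map_congr_left ?_
        intro c hc
        obtain ⟨hcS, hcne⟩ := (PySem.Set.mem_discard _ _ _).mp hc
        rw [hfne c hcne]
      rw [hmapeq]
      refine List.pairwise_cons.mpr ⟨?_, ?_⟩
      · intro b hb
        rw [hfself]
        obtain ⟨c, hc, rfl⟩ := List.mem_map.mp hb
        obtain ⟨hcS, hcne⟩ := (PySem.Set.mem_discard _ _ _).mp hc
        have hne := ih1 c hcS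
        have hmem := headD_mem _ (0 : Int) hne
        obtain ⟨q, hq, hq1⟩ := List.mem_map.mp hmem
        have hlt : a.1 < q.1 := ha q (List.mem_of_mem_filter hq)
        rw [List.map_cons, ← hq1]
        simpa using hlt
      · have hsub : ((PySem.Set.ofList (l.map (·.2))).discard a.2).Sublist
            (PySem.Set.ofList (l.map (·.2))) := by simp [PySem.Set.discard]
        exact ih2.sublist (hsub.map _)

lemma pvChainAbove_of_heads (gs : List (List Int)) (r : Int)
    (hne : ∀ g ∈ gs, g ≠ []) (hp : (r :: gs.map (·.headD 0)).Pairwise (· < ·)) :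
    pvChainAbove r gs := by
  induction gs generalizing r with
  | nil => trivial
  | cons g rest ih =>
    rw [List.map_cons, List.pairwise_cons] at hp
    obtain ⟨h1, h2⟩ := hp
    refine ⟨g.headD 0, headD_mem _ _ (hne g (by simp)), ?_, ?_⟩
    · exact h1 _ (by simp)
    · exact ih _ (fun g' hg' => hne g' (List.mem_cons_of_mem _ hg')) h2

lemma pvSum_count_comm {α β : Type} (P : List α) (g : List β) (q : α → β → Bool) :
    (P.map (fun x => ((g.countP (fun e => q x e) : Nat) : Int))).sum
      = (g.map (fun e => ((P.countP (fun x => q x e) : Nat) : Int))).sum := by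
  induction P with
  | nil => simp
  | cons a P ih =>
    rw [List.map_cons, List.sum_cons, ih]
    have h1 : (g.map (fun e => ((((a :: P).countP (fun x => q x e) : Nat)) : Int))).sum
        = (g.map (fun e => (if q a e then (1 : Int) else 0)
            + ((P.countP (fun x => q x e) : Nat) : Int))).sum := by
      refine congrArg _ (List.map_congr_left ?_)
      intro e _
      rw [List.countP_cons]
      by_cases h : q a e = true
      · simp [h]
        ring
      · simp [h]
    rw [h1, PySem.List.sum_map_add_int, PySem.List.sum_map_ite_one_zero]

lemma pvSum_map_filter {α : Type} (g : List α) (p : α → Bool) (h : α → Int) :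
    ((g.filter p).map h).sum = (g.map (fun e => if p e then h e else 0)).sum := by
  induction g with
  | nil => rfl
  | cons a g ih =>
    rw [List.filter_cons]
    by_cases hp : p a = true <;> simp [hp, ih]

-- the DP invariant: B's counts measure A's paths, grouped by last element
lemma pvMain (gss : List (List Int)) (P : List (List Int)) (C : List (Int × Int))
    (hinv : ∀ p : Int → Bool,
      ((P.filter (fun path => p (pvRootOf path))).length : Int)
        = ((C.filter (fun q => p q.1)).map (·.2)).sum)
    (hchain : ∃ path ∈ P, pvChainAbove (pvRootOf path) gss)
    (hne : P ≠ []) :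
    pvNip gss P
      = ((gss.foldl (fun cnt g =>
          g.map (fun e => (e, ((cnt.filter (fun q => q.1 < e)).map (·.2)).sum))) C).map (·.2)).sum := by
  induction gss generalizing P C with
  | nil =>
    have h := hinv (fun _ => true)
    simpa [pvNip] using h
  | cons g rest ih =>
    have hE : P.isEmpty = false := by simpa [List.isEmpty_iff] using hne
    rw [pvNip, if_neg (by simp [hE])]
    -- normalize A's nested loop into a flatMap
    have hP' : (P.foldl (fun acc path =>
          let root := pvRootOf path
          g.foldl (fun acc2 e =>
            if root < e then acc2 ++ [path ++ [e]] else acc2) acc) [])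
        = P.flatMap (fun path =>
            (g.filter (fun e => decide (pvRootOf path < e))).map (fun e => path ++ [e])) := by
      have hin : ∀ (path : List Int) (acc : List (List Int)),
          g.foldl (fun acc2 e =>
            if pvRootOf path < e then acc2 ++ [path ++ [e]] else acc2) acc
          = acc ++ (g.filter (fun e => decide (pvRootOf path < e))).map (fun e => path ++ [e]) :=
        fun path acc => PySem.List.foldl_append_ite (fun e => pvRootOf path < e) _ _ _
      have hfun : (fun (acc : List (List Int)) (path : List Int) =>
          let root := pvRootOf path
          g.foldl (fun acc2 e =>
            if root < e then acc2 ++ [path ++ [e]] else acc2) acc)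
          = fun acc path =>
            acc ++ (g.filter (fun e => decide (pvRootOf path < e))).map (fun e => path ++ [e]) := by
        funext acc path
        exact hin path acc
      rw [hfun, PySem.List.foldl_append_eq_flatMap]
      simp
    set P' := P.flatMap (fun path =>
        (g.filter (fun e => decide (pvRootOf path < e))).map (fun e => path ++ [e])) with hP'def
    rw [hP']
    obtain ⟨path0, hpath0, hch⟩ := hchain
    obtain ⟨e0, he0g, he0lt, hch0⟩ := hch
    have hmem0 : path0 ++ [e0] ∈ P' := by
      rw [hP'def]
      refine List.mem_flatMap.mpr ⟨path0, hpath0, ?_⟩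
      exact List.mem_map.mpr ⟨e0, List.mem_filter.mpr ⟨he0g, by simpa using he0lt⟩, rfl⟩
    rw [List.foldl_cons]
    refine ih P' (g.map (fun e => (e, ((C.filter (fun q => q.1 < e)).map (·.2)).sum))) ?_ ?_ ?_
    · -- the invariant is preserved
      intro p
      -- LHS: count over the flatMap
      have hL : (P'.filter (fun path => p (pvRootOf path))).length
          = (P.map (fun path => (g.countP (fun e => decide (pvRootOf path < e) && p e)))).sum := by
        rw [hP'def, List.filter_flatMap, List.length_flatMap]
        congr 1
        refine List.map_congr_left ?_
        intro path _
        rw [List.filter_map, List.length_map, List.filter_filter, List.countP_eq_length_filter.symm]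
        refine List.countP_congr ?_
        intro e _
        simp [pvRootOf_concat, Bool.and_comm, Function.comp]
      have hR : (((g.map (fun e => (e, ((C.filter (fun q => q.1 < e)).map (·.2)).sum))).filter
            (fun q => p q.1)).map (·.2)).sum
          = (g.map (fun e => if p e then
              ((P.filter (fun path => decide (pvRootOf path < e))).length : Int) else 0)).sum := by
        rw [List.filter_map, List.map_map]
        have : ∀ e, (fun q : Int × Int => p q.1) ((fun e => (e, ((C.filter (fun q => q.1 < e)).map (·.2)).sum)) e) = p e := fun _ => rfl
        rw [show (List.filter ((fun q : Int × Int => p q.1) ∘ fun e =>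
              (e, ((C.filter (fun q => q.1 < e)).map (·.2)).sum)) g) = g.filter p from rfl]
        rw [pvSum_map_filter]
        refine congrArg _ (List.map_congr_left ?_)
        intro e _
        by_cases hp : p e = true
        · simp only [hp, if_true, Function.comp]
          exact (hinv (fun x => decide (x < e))).symm
        · simp [hp]
      rw [hR, hL]
      push_cast
      rw [List.map_map]
      have hcast : (Nat.cast ∘ fun path => List.countP (fun e => decide (pvRootOf path < e) && p e) g)
          = fun path : List Int => ((g.countP (fun e => decide (pvRootOf path < e) && p e) : Nat) : Int) := rfl
      rw [hcast, pvSum_count_comm P g (fun path e => decide (pvRootOf path < e) && p e)]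
      refine congrArg List.sum (List.map_congr_left ?_)
      intro e _
      by_cases hp : p e = true
      · rw [if_pos hp, List.countP_eq_length_filter]
        refine congrArg _ (congrArg _ (List.filter_congr ?_))
        intro path _
        simp [hp]
      · rw [if_neg hp]
        have : (List.countP (fun path => decide (pvRootOf path < e) && p e) P) = 0 := by
          rw [List.countP_eq_zero]
          intro path _
          simp [hp]
        simp [this]
    · exact ⟨path0 ++ [e0], hmem0, by rw [pvRootOf_concat]; exact hch0⟩
    · exact fun h => by simp [h] at hmem0

-- ===== VERDICT (by name: the statement is the Claim_ definition above) =====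
theorem howManyRuns_spec : Claim_equal_howManyRuns := by
  unfold Claim_equal_howManyRuns
  intro s _
  unfold Spec_howManyRuns
  have hA : howManyRuns s = pvNip (pvGroups s) [] := by
    simp only [howManyRuns]
    rw [pvChars_eq, pvGroupsA_eq]
  have hB : howManyRuns_alt s = (match pvGroups s with
      | [] => (0 : Int)
      | g0 :: rest => ((rest.foldl (fun cnt g =>
          g.map (fun e => (e, ((cnt.filter (fun q => q.1 < e)).map (·.2)).sum)))
          (g0.map (fun i => (i, (1 : Int))))).map (·.2)).sum) := by
    simp only [howManyRuns_alt]
    rw [pvGroupsB_eq]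
  rw [hA, hB]
  have haux := pvGroups_aux (PySem.List.enumerate s.toList 0)
    (PySem.List.pairwise_lt_enumerate _ _)
  rw [PySem.List.map_snd_enumerate] at haux
  obtain ⟨hne_all, hpairs⟩ := haux
  have hne_all' : ∀ g ∈ pvGroups s, g ≠ [] := by
    intro g hgm
    obtain ⟨c, hc, rfl⟩ := List.mem_map.mp hgm
    exact hne_all c hc
  have hpairs' : ((pvGroups s).map (·.headD 0)).Pairwise (· < ·) := by
    unfold pvGroups
    rw [List.map_map]
    exact hpairs
  cases hg : pvGroups s with
  | nil => simp [pvNip]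
  | cons g0 rest =>
    rw [hg] at hne_all' hpairs'
    have hg0 : g0 ≠ [] := hne_all' g0 (by simp)
    have hstep : pvNip (g0 :: rest) ([] : List (List Int))
        = pvNip rest (g0.map fun a => [a]) := by simp [pvNip]
    rw [hstep]
    refine pvMain rest (g0.map fun a => [a]) (g0.map fun i => (i, (1 : Int))) ?_ ?_ ?_
    · intro p
      simp [List.filter_map, Function.comp_def, pvRootOf_singleton, List.map_map]
    · refine ⟨[g0.headD 0], List.mem_map.mpr ⟨g0.headD 0, headD_mem _ _ hg0, rfl⟩, ?_⟩
      rw [pvRootOf_singleton]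
      refine pvChainAbove_of_heads rest (g0.headD 0)
        (fun g hgm => hne_all' g (List.mem_cons_of_mem _ hgm)) ?_
      simpa using hpairs'
    · simp [hg0]
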